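-- pv_equiv track=rewrite | github.com/rollingstorms/groggy | python-groggy/python/groggy/query_parser.py | _tokenize_query
-- ===== SOURCE A (Python) =====
-- from typing import Union, Any, List
--
-- def _tokenize_query(query: str) -> List[str]:
--     """Tokenize a query string, handling quoted strings and operators."""
--     tokens = []
--     current_token = ""
--     in_quotes = False
--     quote_char = None
--     i = 0
--
--     while i < len(query):
--         char = query[i]
--
--         if char in ['"', "'"] and (not in_quotes or char == quote_char):
--             if in_quotes and char == quote_char:
--                 # End of quoted string
--                 current_token += char
--                 tokens.append(current_token)
--                 current_token = ""
--                 in_quotes = False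
--                 quote_char = None
--             else:
--                 # Start of quoted string
--                 if current_token.strip():
--                     tokens.append(current_token.strip())
--                 current_token = char
--                 in_quotes = True
--                 quote_char = char
--         elif in_quotes:
--             current_token += char
--         elif char.isspace():
--             if current_token.strip():
--                 tokens.append(current_token.strip())
--                 current_token = ""
--         elif char == '(':
--             if current_token.strip():
--                 tokens.append(current_token.strip())
--                 current_token = ""
--             tokens.append('(')
--         elif char == ')':
--             if current_token.strip():
--                 tokens.append(current_token.strip())
--                 current_token = ""
--             tokens.append(')')
--         else:
--             current_token += char
--
--         i += 1
--
--     if current_token.strip():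
--         tokens.append(current_token.strip())
--
--     return tokens
-- ===== SOURCE B (Python) =====
-- from typing import List
--
-- def _tokenize_query(query: str) -> List[str]:
--     """Tokenize a query string, handling quoted strings and operators."""
--     tokens = []
--     n = len(query)
--     i = 0
--     while i < n:
--         c = query[i]
--         if c.isspace():
--             i += 1
--         elif c in '()':
--             tokens.append(c)
--             i += 1
--         elif c in '"\'':
--             j = query.find(c, i + 1)
--             if j == -1:
--                 tokens.append(query[i:].rstrip())
--                 i = n
--             else:
--                 tokens.append(query[i:j + 1])
--                 i = j + 1
--         else:
--             j = i + 1
--             while j < n and not (query[j].isspace() or query[j] in '()"\''):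
--                 j += 1
--             tokens.append(query[i:j])
--             i = j
--     return tokens
-- ===== Notes on version B (the rewrite author's own statement) =====
-- stated objective: faster
-- what changed: Replaced A's char-by-char state machine (in_quotes/quote_char/current_token accumulator built by repeated string concatenation) with a stateless scanner that consumes one whole token per step: skip whitespace, emit a paren, jump straight to the closing quote with str.find, or slice off a maximal run of ordinary characters.
import Mathlib
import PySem

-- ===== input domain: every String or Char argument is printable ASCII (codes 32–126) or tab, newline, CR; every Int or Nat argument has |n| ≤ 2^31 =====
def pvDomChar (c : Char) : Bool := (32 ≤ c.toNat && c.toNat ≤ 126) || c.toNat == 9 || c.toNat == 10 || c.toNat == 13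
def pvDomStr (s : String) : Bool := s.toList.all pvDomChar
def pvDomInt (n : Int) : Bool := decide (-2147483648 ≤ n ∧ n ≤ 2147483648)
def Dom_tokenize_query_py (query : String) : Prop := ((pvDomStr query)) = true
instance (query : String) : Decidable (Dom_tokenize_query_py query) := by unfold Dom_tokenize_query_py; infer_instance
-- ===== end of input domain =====

-- B replaces A's char-by-char in_quotes/current_token state machine by a stateless scanner that
-- consumes a whole token (quoted run, paren, or ordinary run) per step; same return value (alternative).

-- ===== PORT A =====
-- A's while loop over query[i], transliterated as recursion over the character list with the
-- same state (tokens, current_token, in_quotes, quote_char).  `if current_token.strip():` is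
-- `if strip cur ≠ []` (Python truthiness of the stripped string).
def tokenize_query_py_loop : List Char → List String → List Char → Bool → Option Char → List String
  | [], tokens, cur, _, _ =>
      if PySem.Chars.strip cur = [] then tokens
      else tokens ++ [String.ofList (PySem.Chars.strip cur)]
  | c :: rest, tokens, cur, inq, qc =>
      if (c == '"' || c == '\'') && (!inq || qc == some c) then
        if inq && qc == some c then
          -- end of quoted string
          tokenize_query_py_loop rest (tokens ++ [String.ofList (cur ++ [c])]) [] false none
        else
          -- start of quoted string
          tokenize_query_py_loop rest
            (if PySem.Chars.strip cur = [] then tokens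
             else tokens ++ [String.ofList (PySem.Chars.strip cur)])
            [c] true (some c)
      else if inq then
        tokenize_query_py_loop rest tokens (cur ++ [c]) inq qc
      else if PySem.Chars.isspace c then
        if PySem.Chars.strip cur = [] then
          tokenize_query_py_loop rest tokens cur inq qc
        else
          tokenize_query_py_loop rest (tokens ++ [String.ofList (PySem.Chars.strip cur)]) [] inq qc
      else if c == '(' then
        if PySem.Chars.strip cur = [] then
          tokenize_query_py_loop rest (tokens ++ ["("]) cur inq qc
        else
          tokenize_query_py_loop rest (tokens ++ [String.ofList (PySem.Chars.strip cur)] ++ ["("]) [] inq qc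
      else if c == ')' then
        if PySem.Chars.strip cur = [] then
          tokenize_query_py_loop rest (tokens ++ [")"]) cur inq qc
        else
          tokenize_query_py_loop rest (tokens ++ [String.ofList (PySem.Chars.strip cur)] ++ [")"]) [] inq qc
      else
        tokenize_query_py_loop rest tokens (cur ++ [c]) inq qc

def tokenize_query_py (query : String) : List String :=
  tokenize_query_py_loop query.toList [] [] false none

-- ===== PORT B =====
-- `not (query[j].isspace() or query[j] in '()"\'')` — the run loop's continue condition.
def pvOrdChar (c : Char) : Bool :=
  !(PySem.Chars.isspace c) && !(c == '(') && !(c == ')') && !(c == '"') && !(c == '\'')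

-- B's while loop: each step consumes one whole token from the remainder.  `query.find(c, i+1)`
-- is `PySem.Chars.find rest [c]` on the remainder (index relative to rest, so the slice bounds
-- shift by i+1: query[i:j+1] = c :: rest.take (jrel+1), resume at rest.drop (jrel+1)); the
-- hand-written run-scanning while loop is the takeWhile/dropWhile split.
def tokenize_query_py_alt_loop : List Char → List String
  | [] => []
  | c :: rest =>
      if PySem.Chars.isspace c then tokenize_query_py_alt_loop rest
      else if c == '(' || c == ')' then
        String.ofList [c] :: tokenize_query_py_alt_loop rest
      else if c == '"' || c == '\'' then
        let j := PySem.Chars.find rest [c]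
        if j = -1 then [String.ofList (PySem.Chars.rstrip (c :: rest))]
        else
          String.ofList (c :: rest.take (j.toNat + 1)) ::
            tokenize_query_py_alt_loop (rest.drop (j.toNat + 1))
      else
        String.ofList (c :: rest.takeWhile pvOrdChar) ::
          tokenize_query_py_alt_loop (rest.dropWhile pvOrdChar)
  termination_by l => l.length
  decreasing_by
    all_goals (have := List.length_dropWhile_le pvOrdChar rest; simp; try omega)

def tokenize_query_py_alt (query : String) : List String :=
  tokenize_query_py_alt_loop query.toList

-- ===== PRECONDITION & SPEC =====
def Spec_tokenize_query_py (query : String) (out : List String) : Prop := out = tokenize_query_py_alt query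
instance (query : String) (out : List String) : Decidable (Spec_tokenize_query_py query out) := by unfold Spec_tokenize_query_py; infer_instance

-- ===== CLAIM (what is proved, stated in full; the proofs are below) =====
def Claim_equal_tokenize_query_py : Prop := ∀ (query : String), Dom_tokenize_query_py query → Spec_tokenize_query_py query (tokenize_query_py query)

-- ===== LEMMAS AND PROOFS =====

-- every char of an unquoted partial token is ordinary
def pvAllOrd (cur : List Char) : Prop := ∀ d ∈ cur, pvOrdChar d = true

theorem pv_dropWhile_none {p : Char → Bool} (l : List Char)
    (h : ∀ d ∈ l, p d = false) : l.dropWhile p = l := by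
  cases l with
  | nil => rfl
  | cons d t => simp [List.dropWhile_cons, h d (by simp)]

theorem pv_strip_of_allOrd (cur : List Char) (h : pvAllOrd cur) :
    PySem.Chars.strip cur = cur := by
  have hns : ∀ d ∈ cur, PySem.Chars.isspace d = false := by
    intro d hd; have := h d hd
    simp [pvOrdChar] at this; exact this.1.1.1.1
  unfold PySem.Chars.strip PySem.Chars.lstrip PySem.Chars.rstrip
  rw [pv_dropWhile_none cur hns,
    pv_dropWhile_none cur.reverse (fun d hd => hns d (List.mem_reverse.mp hd)),
    List.reverse_reverse]

theorem pv_takeWhile_ord (cur l : List Char) (h : pvAllOrd cur)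
    (hl : ∀ c t, l = c :: t → pvOrdChar c = false) :
    (cur ++ l).takeWhile pvOrdChar = cur ∧ (cur ++ l).dropWhile pvOrdChar = l := by
  induction cur with
  | nil =>
      simp only [List.nil_append]
      cases l with
      | nil => simp
      | cons c t => simp [List.takeWhile_cons, List.dropWhile_cons, hl c t rfl]
  | cons d cur ih =>
      have hd := h d (by simp)
      have ih' := ih (fun x hx => h x (by simp [hx]))
      simp [List.takeWhile_cons, List.dropWhile_cons, hd, ih'.1, ih'.2]

-- F1: B consumes a nonempty ordinary prefix as one token when the rest starts with a delimiter
theorem pv_alt_absorb (cur l : List Char) (h : pvAllOrd cur) (hne : cur ≠ [])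
    (hl : ∀ c t, l = c :: t → pvOrdChar c = false) :
    tokenize_query_py_alt_loop (cur ++ l) =
      String.ofList cur :: tokenize_query_py_alt_loop l := by
  cases cur with
  | nil => exact absurd rfl hne
  | cons d cur =>
      have hd := h d (by simp)
      simp [pvOrdChar] at hd
      obtain ⟨⟨⟨⟨hsp, hp1'⟩, hp2'⟩, hq1'⟩, hq2'⟩ := hd
      have hp1 : (d == '(') = false := by simp [hp1']
      have hp2 : (d == ')') = false := by simp [hp2']
      have hq1 : (d == '"') = false := by simp [hq1']
      have hq2 : (d == '\'') = false := by simp [hq2']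
      have hsub := pv_takeWhile_ord cur l (fun x hx => h x (by simp [hx])) hl
      rw [List.cons_append, tokenize_query_py_alt_loop]
      simp [hsp, hp1, hp2, hq1, hq2, hsub.1, hsub.2]

theorem pv_find_singleton_none (q : Char) (body : List Char) (h : q ∉ body) :
    PySem.Chars.find body [q] = -1 := by
  rw [PySem.Chars.find_eq_neg_one_iff]
  intro hinf
  exact h (hinf.mem (by simp))

theorem pv_singleton_prefix_drop (q : Char) (l : List Char) (i : Nat) :
    [q] <+: l.drop i ↔ ∃ t, l.drop i = q :: t := by
  constructor
  · rintro ⟨t, ht⟩; exact ⟨t, by simpa using ht.symm⟩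
  · rintro ⟨t, ht⟩; exact ⟨t, by simpa using ht.symm⟩

theorem pv_find_singleton_at (q : Char) (body tail : List Char) (h : q ∉ body) :
    PySem.Chars.find (body ++ q :: tail) [q] = (body.length : Int) := by
  have hmem : [q] <:+: (body ++ q :: tail) := by
    refine List.infix_iff_prefix_suffix.mpr ⟨q :: tail, ⟨tail, rfl⟩, ⟨body, rfl⟩⟩
  have hnn : 0 ≤ PySem.Chars.find (body ++ q :: tail) [q] :=
    (PySem.Chars.find_nonneg_iff _ _).mpr hmem
  obtain ⟨hpre, hmin⟩ := PySem.Chars.find_spec hnn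
  set j := (PySem.Chars.find (body ++ q :: tail) [q]).toNat with hj
  rcases lt_trichotomy j body.length with hlt | heq | hgt
  · exfalso
    obtain ⟨t, ht⟩ := (pv_singleton_prefix_drop _ _ _).mp hpre
    have : (body ++ q :: tail)[j]? = some q := by
      rw [List.getElem?_eq_some_iff]
      · refine ⟨by simp; omega, ?_⟩
        have := congrArg (·.head?) ht
        simpa [List.head?_drop, List.getElem?_eq_getElem (by simp; omega : j < (body ++ q :: tail).length)] using this
    have hb : body[j]? = some q := by
      rwa [List.getElem?_append_left hlt] at this
    exact h (by
      have := List.getElem?_eq_some_iff.mp hb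
      obtain ⟨hj2, hv⟩ := this
      exact hv ▸ List.getElem_mem hj2)
  · omega
  · exfalso
    apply hmin body.length hgt
    rw [pv_singleton_prefix_drop]
    exact ⟨tail, by simp⟩

theorem pv_rstrip_cons (q : Char) (body : List Char) (h : PySem.Chars.isspace q = false) :
    PySem.Chars.rstrip (q :: body) = q :: PySem.Chars.rstrip body := by
  unfold PySem.Chars.rstrip
  rw [List.reverse_cons, List.dropWhile_append]
  split
  · next heq =>
      rw [List.isEmpty_iff] at heq
      simp [List.dropWhile_cons, h, heq]
  · simp

theorem pv_strip_quote (q : Char) (body : List Char) (h : PySem.Chars.isspace q = false) :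
    PySem.Chars.strip (q :: body) = q :: PySem.Chars.rstrip body := by
  unfold PySem.Chars.strip PySem.Chars.lstrip
  rw [List.dropWhile_cons]
  simp only [h]
  exact pv_rstrip_cons q body h

theorem pv_alt_quote (q : Char) (s : List Char) (hq : q = '"' ∨ q = '\'') :
    tokenize_query_py_alt_loop (q :: s) =
      if PySem.Chars.find s [q] = -1 then [String.ofList (PySem.Chars.rstrip (q :: s))]
      else String.ofList (q :: s.take ((PySem.Chars.find s [q]).toNat + 1)) ::
        tokenize_query_py_alt_loop (s.drop ((PySem.Chars.find s [q]).toNat + 1)) := by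
  rcases hq with h | h <;> subst h <;>
    rw [tokenize_query_py_alt_loop, if_neg (by decide), if_neg (by decide), if_pos (by decide)]

theorem pv_ns_lparen : PySem.Chars.isspace '(' = false := by decide
theorem pv_ns_rparen : PySem.Chars.isspace ')' = false := by decide

-- the main induction: A's state machine from any reachable state equals B on the pending input
theorem pv_main (rest : List Char) :
    (∀ tokens cur, pvAllOrd cur →
        tokenize_query_py_loop rest tokens cur false none =
          tokens ++ tokenize_query_py_alt_loop (cur ++ rest)) ∧
    (∀ tokens q body, (q = '"' ∨ q = '\'') → q ∉ body →
        tokenize_query_py_loop rest tokens (q :: body) true (some q) =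
          tokens ++ tokenize_query_py_alt_loop (q :: (body ++ rest))) := by
  induction rest with
  | nil =>
      constructor
      · intro tokens cur h
        rw [tokenize_query_py_loop, pv_strip_of_allOrd cur h, List.append_nil]
        cases hc : cur with
        | nil => simp [tokenize_query_py_alt_loop]
        | cons d cur' =>
            subst hc
            have habs := pv_alt_absorb (d :: cur') [] h (by simp)
              (by intro c t ht; simp at ht)
            rw [List.append_nil] at habs
            rw [if_neg (by simp), habs]
            simp [tokenize_query_py_alt_loop]
      · intro tokens q body hq hnb
        have hqs : PySem.Chars.isspace q = false := by
          rcases hq with h | h <;> subst h <;> decide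
        rw [tokenize_query_py_loop, pv_strip_quote q body hqs]
        rw [if_neg (by simp), List.append_nil, pv_alt_quote q body hq,
          if_pos (pv_find_singleton_none q body hnb), pv_rstrip_cons q body hqs]
  | cons c rest ih =>
      constructor
      · -- unquoted state
        intro tokens cur h
        rw [tokenize_query_py_loop]
        by_cases hq : c = '"' ∨ c = '\''
        · have hqb : (c == '"' || c == '\'') = true := by rcases hq with h' | h' <;> simp [h']
          rw [if_pos (by simp [hqb])]
          rw [if_neg (by simp)]
          rw [pv_strip_of_allOrd cur h]
          have hcord : pvOrdChar c = false := by
            rcases hq with h' | h' <;> rw [h'] <;> decide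
          cases hc : cur with
          | nil =>
              rw [if_pos rfl, (ih.2 tokens c [] hq (by simp))]
              simp
          | cons d cur' =>
              subst hc
              rw [if_neg (by simp), (ih.2 _ c [] hq (by simp))]
              rw [pv_alt_absorb (d :: cur') (c :: rest) h (by simp)
                (by intro x t hxt; cases hxt; exact hcord)]
              simp
        · have hqb : (c == '"' || c == '\'') = false := by
            simp only [not_or] at hq; simp [hq.1, hq.2]
          rw [if_neg (by simp [hqb]), if_neg (by simp)]
          by_cases hs : PySem.Chars.isspace c = true
          · rw [if_pos hs, pv_strip_of_allOrd cur h]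
            have hcord : pvOrdChar c = false := by simp [pvOrdChar, hs]
            cases hc : cur with
            | nil =>
                rw [if_pos rfl, ih.1 tokens [] (by intro d hd; simp at hd)]
                simp [tokenize_query_py_alt_loop, hs]
            | cons d cur' =>
                subst hc
                rw [if_neg (by simp), ih.1 _ [] (by intro d hd; simp at hd)]
                rw [pv_alt_absorb (d :: cur') (c :: rest) h (by simp)
                  (by intro x t hxt; cases hxt; exact hcord)]
                simp [tokenize_query_py_alt_loop, hs]
          · rw [if_neg hs]
            by_cases hp1 : c = '('
            · rw [if_pos (by simp [hp1]), pv_strip_of_allOrd cur h]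
              have hcord : pvOrdChar c = false := by rw [hp1]; decide
              cases hc : cur with
              | nil =>
                  rw [if_pos rfl, ih.1 _ [] (by intro d hd; simp at hd)]
                  simp [tokenize_query_py_alt_loop, hs, hp1, pv_ns_lparen]
              | cons d cur' =>
                  subst hc
                  rw [if_neg (by simp), ih.1 _ [] (by intro d hd; simp at hd)]
                  rw [pv_alt_absorb (d :: cur') (c :: rest) h (by simp)
                    (by intro x t hxt; cases hxt; exact hcord)]
                  simp [tokenize_query_py_alt_loop, hs, hp1, pv_ns_lparen]
            · rw [if_neg (by simp [hp1])]
              by_cases hp2 : c = ')'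
              · rw [if_pos (by simp [hp2]), pv_strip_of_allOrd cur h]
                have hcord : pvOrdChar c = false := by rw [hp2]; decide
                cases hc : cur with
                | nil =>
                    rw [if_pos rfl, ih.1 _ [] (by intro d hd; simp at hd)]
                    simp [tokenize_query_py_alt_loop, hs, hp2, pv_ns_rparen]
                | cons d cur' =>
                    subst hc
                    rw [if_neg (by simp), ih.1 _ [] (by intro d hd; simp at hd)]
                    rw [pv_alt_absorb (d :: cur') (c :: rest) h (by simp)
                      (by intro x t hxt; cases hxt; exact hcord)]
                    simp [tokenize_query_py_alt_loop, hs, hp2, pv_ns_rparen]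
              · -- ordinary char: accumulate
                rw [if_neg (by simp [hp2])]
                have hcord : pvOrdChar c = true := by
                  simp only [not_or] at hq
                  simp [pvOrdChar, hs, hp1, hp2, hq.1, hq.2]
                have h' : pvAllOrd (cur ++ [c]) := by
                  intro d hd
                  rcases List.mem_append.mp hd with hd | hd
                  · exact h d hd
                  · simp at hd; simpa [hd] using hcord
                rw [ih.1 tokens (cur ++ [c]) h']
                simp
      · -- in-quotes state
        intro tokens q body hq hnb
        have hqs : PySem.Chars.isspace q = false := by
          rcases hq with h | h <;> simp [h, PySem.Chars.isspace]
        have hqb : (q == '"' || q == '\'') = true := by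
          rcases hq with h | h <;> simp [h]
        rw [tokenize_query_py_loop]
        by_cases hc : c = q
        · subst hc
          rw [if_pos (by simp [hqb]), if_pos (by simp)]
          rw [ih.1 _ [] (by intro d hd; simp at hd)]
          have hrhs : tokenize_query_py_alt_loop (c :: (body ++ c :: rest)) =
              String.ofList (c :: (body ++ [c])) :: tokenize_query_py_alt_loop rest := by
            rw [pv_alt_quote c _ hq, pv_find_singleton_at c body rest hnb]
            rw [if_neg (by omega)]
            have h1 : ((body.length : Int)).toNat + 1 = (body ++ [c]).length := by simp
            rw [h1, List.append_cons body c rest, List.take_left, List.drop_left]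
          rw [hrhs]
          simp
        · rw [if_neg (by simp [hc]; exact fun _ h => hc h.symm), if_pos (by simp)]
          have : (q :: body) ++ [c] = q :: (body ++ [c]) := by simp
          rw [this, ih.2 tokens q (body ++ [c]) hq
            (by simp [hnb]; exact fun h => hc h.symm)]
          simp

-- ===== VERDICT (by name: the statement is the Claim_ definition above) =====
theorem tokenize_query_py_spec : Claim_equal_tokenize_query_py := by
  intro query _
  unfold Spec_tokenize_query_py tokenize_query_py tokenize_query_py_alt
  rw [(pv_main query.toList).1 [] [] (by intro d hd; simp at hd)]
  simp
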